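-- pv_equiv track=rewrite | github.com/vandenberghinc/w3bsite | w3bsite/classes/utils/__init__.py | __first_occurence_reversed__
-- ===== SOURCE A (Python) =====
-- def __first_occurence_reversed__(string="", charset=[" ", "\n"]):
-- 	c, space_newline_id = len(string)-1, ""
-- 	for _ in string:
-- 		char = string[c]
-- 		if char in charset:
-- 			a = 0
-- 			for i in charset:
-- 				if i == char: return i
-- 		c -= 1
-- 	return None
-- ===== SOURCE B (Python) =====
-- def __first_occurence_reversed__(string="", charset=[" ", "\n"]):
-- 	last = None
-- 	for ch in string:
-- 		if ch in charset:
-- 			last = ch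
-- 	return last
-- ===== Notes on version B (the rewrite author's own statement) =====
-- stated objective: simpler
-- what changed: Replaces the backward index scan with an early return and an inner charset loop by a single forward fold that keeps the last matching character in an accumulator.
import Mathlib
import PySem

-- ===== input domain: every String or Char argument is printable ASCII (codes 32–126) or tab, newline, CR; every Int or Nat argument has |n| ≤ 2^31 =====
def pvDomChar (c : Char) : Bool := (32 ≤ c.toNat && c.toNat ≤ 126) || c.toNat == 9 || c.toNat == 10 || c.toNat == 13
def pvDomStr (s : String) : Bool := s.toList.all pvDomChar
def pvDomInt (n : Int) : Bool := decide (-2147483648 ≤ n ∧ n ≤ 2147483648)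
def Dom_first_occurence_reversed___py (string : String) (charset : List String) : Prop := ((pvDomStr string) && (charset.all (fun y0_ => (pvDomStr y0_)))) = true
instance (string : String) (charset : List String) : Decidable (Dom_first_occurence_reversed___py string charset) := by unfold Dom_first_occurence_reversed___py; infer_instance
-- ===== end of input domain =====

-- B replaces A's backward index scan (early return, inner charset loop) by one forward fold
-- keeping the last matching character; objective: simpler.

-- ===== PORT A =====
-- inner loop: 'for i in charset: if i == char: return i' (none = fell through)
def pvInnerA : List String → String → Option String
  | [], _ => none
  | i :: rest, char => if i == char then some i else pvInnerA rest char

-- outer loop: 'for _ in string: char = string[c]; …; c -= 1'; the 'none' arm of pyGet?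
-- (Python IndexError) is unreachable since c stays in range.
def pvLoopA (s : String) (charset : List String) : List Char → Int → Option String
  | [], _ => none
  | _ :: rest, c =>
    match PySem.Str.pyGet? s c with
    | none => none
    | some ch =>
      let char := String.singleton ch
      if charset.contains char then
        match pvInnerA charset char with
        | some v => some v
        | none => pvLoopA s charset rest (c - 1)
      else pvLoopA s charset rest (c - 1)

def first_occurence_reversed___py (string : String) (charset : List String) : Option String :=
  pvLoopA string charset string.toList ((PySem.Str.len string : Int) - 1)

-- ===== PORT B =====
def first_occurence_reversed___py_alt (string : String) (charset : List String) : Option String :=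
  string.toList.foldl
    (fun last ch => if charset.contains (String.singleton ch) then some (String.singleton ch) else last)
    none

-- ===== PRECONDITION & SPEC =====
def Spec_first_occurence_reversed___py (string : String) (charset : List String) (out : Option String) : Prop := out = first_occurence_reversed___py_alt string charset
instance (string : String) (charset : List String) (out : Option String) : Decidable (Spec_first_occurence_reversed___py string charset out) := by unfold Spec_first_occurence_reversed___py; infer_instance

-- ===== CLAIM (what is proved, stated in full; the proofs are below) =====
def Claim_equal_first_occurence_reversed___py : Prop := ∀ (string : String) (charset : List String), Dom_first_occurence_reversed___py string charset → Spec_first_occurence_reversed___py string charset (first_occurence_reversed___py string charset)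

-- ===== LEMMAS AND PROOFS =====

-- A's inner loop returns the element of charset equal to char, i.e. char itself.
lemma pvInnerA_of_mem (cs : List String) (x : String) (h : x ∈ cs) :
    pvInnerA cs x = some x := by
  induction cs with
  | nil => cases h
  | cons i rest ih =>
    simp only [pvInnerA]
    by_cases hix : i = x
    · subst hix; simp
    · have hb : (i == x) = false := by simp [hix]
      rw [hb]
      simp only [Bool.false_eq_true, if_false]
      rcases List.mem_cons.mp h with h' | h'
      · exact absurd h'.symm hix
      · exact ih h'

-- The backward scan over the first n characters equals the forward fold over them.
lemma pvLoopA_eq_foldl (s : String) (cs : List String) :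
    ∀ (l : List Char) (n : Nat), l.length = n → n ≤ s.toList.length →
      pvLoopA s cs l ((n : Int) - 1) =
        (s.toList.take n).foldl
          (fun last ch => if cs.contains (String.singleton ch) then some (String.singleton ch) else last)
          none := by
  intro l
  induction l with
  | nil => intro n hn _; subst hn; simp [pvLoopA]
  | cons x rest ih =>
    intro n hn hle
    subst hn
    have hlt : rest.length < s.toList.length := by simpa using hle
    have hc : (((x :: rest).length : Int) - 1) = (rest.length : Int) := by
      simp only [List.length_cons]; push_cast; ring
    rw [hc]
    have hget : PySem.Str.pyGet? s ((rest.length : Nat) : Int) = some (s.toList[rest.length]'hlt) := by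
      simp [List.getElem?_eq_getElem hlt]
    have htake : s.toList.take (rest.length + 1) = s.toList.take rest.length ++ [s.toList[rest.length]'hlt] :=
      List.take_succ_eq_append_getElem hlt
    simp only [pvLoopA, hget, List.length_cons, htake, List.foldl_append, List.foldl_cons, List.foldl_nil]
    set ch := s.toList[rest.length]'hlt with hch
    have hrec := ih rest.length rfl (le_of_lt hlt)
    by_cases hmem : String.singleton ch ∈ cs
    · rw [pvInnerA_of_mem cs _ hmem]
      simp [hmem]
    · simp [hmem, hrec]

-- ===== VERDICT (by name: the statement is the Claim_ definition above) =====
theorem first_occurence_reversed___py_spec : Claim_equal_first_occurence_reversed___py := by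
  intro s cs _
  unfold Spec_first_occurence_reversed___py first_occurence_reversed___py first_occurence_reversed___py_alt
  have h := pvLoopA_eq_foldl s cs s.toList s.toList.length rfl le_rfl
  rw [List.take_length] at h
  simpa using h
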